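-- pv_equiv track=rewrite | github.com/Winspear/AdventOfCode2023 | Day3/day3.py | get_left_number
-- ===== SOURCE A (Python) =====
-- def get_left_number(current_line, start_index):
--     number = ''
--     if start_index == 0:
--         return None
--     elif not current_line[start_index - 1].isdigit():
--         return None
--     else:
--         iterator_index = start_index
--         while True:
--             if current_line[iterator_index - 1].isdigit():
--                 iterator_index = iterator_index - 1
--                 if iterator_index == 0:
--                     break
--             else:
--                 break
--         while True:
--             if current_line[iterator_index].isdigit():
--                 number = number + current_line[iterator_index]
--                 iterator_index += 1
--             else:
--                 break
--
--     return number
-- ===== SOURCE B (Python) =====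
-- def get_left_number(current_line, start_index):
--     # Bidirectional scan outward from the pivot instead of A's
--     # find-the-start-then-rescan-forward pair of loops.
--     if start_index == 0 or not current_line[start_index - 1].isdigit():
--         return None
--     left = ''
--     i = start_index - 1
--     while i >= 0 and current_line[i].isdigit():
--         left = current_line[i] + left
--         i -= 1
--     right = ''
--     j = start_index
--     while j < len(current_line) and current_line[j].isdigit():
--         right = right + current_line[j]
--         j += 1
--     return left + right
-- ===== Notes on version B (the rewrite author's own statement) =====
-- stated objective: alternative
-- what changed: B scans outward from the pivot, building the left part by prepending digits while walking left and the right part by appending digits while walking right (with bound guards), instead of A's rewind-the-pointer loop followed by a full forward re-scan of the number.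
-- outside the precondition, e.g. on get_left_number('a12x', -2): A returns '12', B returns '2'
-- crash fix: When the digit run containing position start_index-1 reaches the end of the line (or, for negative start_index, when Python's wraparound walks A's left scan off the front of an all-digit prefix) A raises IndexError, while B's bound-guarded scans return the number string. — e.g. on get_left_number("a12", 2): A raises IndexError, B returns some "12"
import Mathlib
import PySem

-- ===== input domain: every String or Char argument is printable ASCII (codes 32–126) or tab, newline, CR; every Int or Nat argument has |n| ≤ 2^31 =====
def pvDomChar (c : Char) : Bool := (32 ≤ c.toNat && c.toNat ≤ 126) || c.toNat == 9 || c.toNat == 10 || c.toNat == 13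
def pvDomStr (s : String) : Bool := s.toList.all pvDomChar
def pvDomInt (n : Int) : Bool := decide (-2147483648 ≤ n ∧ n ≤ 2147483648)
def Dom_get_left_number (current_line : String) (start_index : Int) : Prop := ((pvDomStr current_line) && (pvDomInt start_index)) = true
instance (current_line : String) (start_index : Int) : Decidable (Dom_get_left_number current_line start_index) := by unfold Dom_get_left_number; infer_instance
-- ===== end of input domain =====

-- B reads the number by a bidirectional scan outward from the pivot instead of A's rewind-then-rescan pair of loops;
-- equal return values proved on Pre_ (A also raises IndexError on some inputs; those are outside Pre_, see Raises_).

-- ===== PORT A =====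
-- A's first 'while True' loop: rewinds iterator_index while the char to its left is a digit (break at 0).
-- Fuel-based recursion; 'none' = IndexError / insufficient fuel (unreachable under Pre_).
def glnLeftLoop (cs : List Char) : Nat → Int → Option Int
  | 0, _ => none
  | f + 1, it =>
    match PySem.List.pyGet? cs (it - 1) with
    | none => none
    | some c =>
      if PySem.Chars.isdigit c then
        if it - 1 = 0 then some 0 else glnLeftLoop cs f (it - 1)
      else some it

-- A's second 'while True' loop: appends digits from iterator_index on; 'none' = IndexError (run reaches line end).
def glnRightLoop (cs : List Char) : Nat → Int → List Char → Option (List Char)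
  | 0, _, _ => none
  | f + 1, it, number =>
    match PySem.List.pyGet? cs it with
    | none => none
    | some c =>
      if PySem.Chars.isdigit c then glnRightLoop cs f (it + 1) (number ++ [c])
      else some number

def get_left_number (current_line : String) (start_index : Int) : Option String :=
  let cs := current_line.toList
  if start_index = 0 then none
  else
    match PySem.List.pyGet? cs (start_index - 1) with
    | none => none       -- IndexError in the guard (outside Pre_)
    | some c =>
      if ¬ PySem.Chars.isdigit c then none
      else
        let fuel := cs.length + start_index.natAbs + 1
        match glnLeftLoop cs fuel start_index with
        | none => none   -- IndexError in the left loop (outside Pre_)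
        | some it =>
          match glnRightLoop cs fuel it [] with
          | none => none -- IndexError in the right loop (outside Pre_)
          | some number => some (String.ofList number)

-- ===== PORT B =====
-- B's left walk: while i >= 0 and line[i].isdigit(): prepend line[i]; i -= 1.
def altLeftLoop (cs : List Char) : Nat → Int → List Char → List Char
  | 0, _, left => left
  | f + 1, i, left =>
    if 0 ≤ i then
      match PySem.List.pyGet? cs i with
      | none => left
      | some c => if PySem.Chars.isdigit c then altLeftLoop cs f (i - 1) (c :: left) else left
    else left

-- B's right walk: while j < len(line) and line[j].isdigit(): append line[j]; j += 1.
def altRightLoop (cs : List Char) : Nat → Int → List Char → List Char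
  | 0, _, right => right
  | f + 1, j, right =>
    if j < (cs.length : Int) then
      match PySem.List.pyGet? cs j with
      | none => right
      | some c => if PySem.Chars.isdigit c then altRightLoop cs f (j + 1) (right ++ [c]) else right
    else right

def get_left_number_alt (current_line : String) (start_index : Int) : Option String :=
  let cs := current_line.toList
  if start_index = 0 then none
  else
    match PySem.List.pyGet? cs (start_index - 1) with
    | none => none       -- IndexError in the guard (outside Pre_)
    | some c =>
      if ¬ PySem.Chars.isdigit c then none
      else
        let left := altLeftLoop cs (start_index.natAbs + 1) (start_index - 1) []
        let right := altRightLoop cs (cs.length + start_index.natAbs + 1) start_index []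
        some (String.ofList (left ++ right))

-- ===== PRECONDITION & SPEC =====
-- Pre_ excludes (a) inputs where A raises IndexError: a guard index out of range, a digit run reaching the end of
-- the line, or (negative start_index) the left scan wrapping off an all-digit prefix; and (b) negative start_index
-- whose wrapped guard position holds a digit, where A's returned value is an accident of Python's negative-index
-- wraparound (no caller of this grid helper passes a negative column index).
def Pre_get_left_number (current_line : String) (start_index : Int) : Prop :=
  start_index = 0 ∨
  (start_index < 0 ∧
    ((PySem.List.pyGet? current_line.toList (start_index - 1)).map
        (fun c => !PySem.Chars.isdigit c)).getD false = true) ∨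
  (1 ≤ start_index ∧ start_index ≤ (current_line.toList.length : Int) ∧
    (PySem.Chars.isdigit (current_line.toList.getD (start_index - 1).toNat ' ') = true →
      (current_line.toList.drop start_index.toNat).any (fun c => !PySem.Chars.isdigit c) = true))
instance (current_line : String) (start_index : Int) : Decidable (Pre_get_left_number current_line start_index) := by
  unfold Pre_get_left_number; infer_instance

def pvWitness_get_left_number : String × Int := ("a1b", 2)

-- When the digit run containing position start_index-1 reaches the end of the line (or, for negative start_index,
-- when Python's wraparound walks A's left scan off the front of an all-digit prefix) A raises IndexError, while B's
-- bound-guarded scans return the number string.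
def Raises_get_left_number (current_line : String) (start_index : Int) : Prop :=
  (1 ≤ start_index ∧ start_index ≤ (current_line.toList.length : Int) ∧
    PySem.Chars.isdigit (current_line.toList.getD (start_index - 1).toNat ' ') = true ∧
    (current_line.toList.drop start_index.toNat).all PySem.Chars.isdigit = true) ∨
  (start_index < 0 ∧ 1 ≤ start_index + (current_line.toList.length : Int) ∧
    (current_line.toList.take (start_index + (current_line.toList.length : Int)).toNat).all
      PySem.Chars.isdigit = true)
instance (current_line : String) (start_index : Int) : Decidable (Raises_get_left_number current_line start_index) := by
  unfold Raises_get_left_number; infer_instance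
def pvRaiseWitness_get_left_number : String × Int := ("a12", 2)
def pvRaiseWitnessOut_get_left_number : Option String := some "12"

def Spec_get_left_number (current_line : String) (start_index : Int) (out : Option String) : Prop := out = get_left_number_alt current_line start_index
instance (current_line : String) (start_index : Int) (out : Option String) : Decidable (Spec_get_left_number current_line start_index out) := by unfold Spec_get_left_number; infer_instance

-- ===== CLAIM (what is proved, stated in full; the proofs are below) =====
def Claim_equal_get_left_number : Prop := ∀ (current_line : String) (start_index : Int), Dom_get_left_number current_line start_index → Pre_get_left_number current_line start_index → Spec_get_left_number current_line start_index (get_left_number current_line start_index)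

def Claim_raises_get_left_number : Prop := (∀ (current_line : String) (start_index : Int), Dom_get_left_number current_line start_index → Raises_get_left_number current_line start_index → ¬ Pre_get_left_number current_line start_index) ∧ (Dom_get_left_number (pvRaiseWitness_get_left_number.1) (pvRaiseWitness_get_left_number.2) ∧ Raises_get_left_number (pvRaiseWitness_get_left_number.1) (pvRaiseWitness_get_left_number.2) ∧ get_left_number_alt (pvRaiseWitness_get_left_number.1) (pvRaiseWitness_get_left_number.2) = pvRaiseWitnessOut_get_left_number)

-- ===== LEMMAS AND PROOFS =====

-- the left boundary A's first loop computes: bnd cs k = start of the digit run ending just before index k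
def bnd (cs : List Char) : Nat → Nat
  | 0 => 0
  | k + 1 => if PySem.Chars.isdigit (cs.getD k ' ') then bnd cs k else k + 1

theorem bnd_le (cs : List Char) (k : Nat) : bnd cs k ≤ k := by
  induction k with
  | zero => simp [bnd]
  | succ k ih => unfold bnd; split <;> omega

theorem bnd_succ (cs : List Char) (m : Nat) :
    bnd cs (m + 1) = if PySem.Chars.isdigit (cs.getD m ' ') = true then bnd cs m else m + 1 := rfl

theorem bnd_all (cs : List Char) (k : Nat) :
    ((cs.take k).drop (bnd cs k)).all PySem.Chars.isdigit = true := by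
  induction k with
  | zero => simp
  | succ k ih =>
    unfold bnd
    by_cases hd : PySem.Chars.isdigit (cs.getD k ' ') = true
    · simp only [hd, if_true]
      by_cases hk : k < cs.length
      · rw [List.take_add_one, List.getElem?_eq_getElem hk]
        rw [List.drop_append_of_le_length (by simp only [List.length_take]; have := bnd_le cs k; omega)]
        simp only [List.all_append, ih, Bool.true_and]
        simpa [← List.getD_eq_getElem cs ' ' hk] using hd
      · rw [List.take_add_one, List.getElem?_eq_none (by omega)]
        simpa using ih
    · simp only [hd, Bool.false_eq_true, if_false]
      simp

theorem takeWhile_split (cs : List Char) (k : Nat) (hk : k ≤ cs.length) :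
    (cs.drop (bnd cs k)).takeWhile PySem.Chars.isdigit =
      (cs.take k).drop (bnd cs k) ++ (cs.drop k).takeWhile PySem.Chars.isdigit := by
  have hb := bnd_le cs k
  have h1 : (cs.take k).drop (bnd cs k) ++ cs.drop k = cs.drop (bnd cs k) := by
    rw [← List.drop_append_of_le_length (by simp; omega), List.take_append_drop]
  rw [← h1, List.takeWhile_append_of_pos]
  intro x hx
  have := bnd_all cs k
  rw [List.all_eq_true] at this
  exact this x hx
-- ===== PORT A =====
-- A's first 'while True' loop: rewinds iterator_index while the char to its left is a digit (break at 0).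
-- Fuel-based recursion; 'none' = IndexError / insufficient fuel (unreachable under Pre_).
theorem A_left (cs : List Char) (f : Nat) : ∀ (k : Nat), 1 ≤ k → k ≤ cs.length → k ≤ f →
    glnLeftLoop cs f (k : Int) = some ((bnd cs k : Nat) : Int) := by
  induction f with
  | zero => intro k h1 _ hf; omega
  | succ f ih =>
    intro k h1 h2 hf
    obtain ⟨m, rfl⟩ : ∃ m, k = m + 1 := ⟨k - 1, by omega⟩
    have hcast : ((m + 1 : Nat) : Int) - 1 = (m : Int) := by push_cast; ring
    have hget : PySem.List.pyGet? cs (((m + 1 : Nat) : Int) - 1) = some (cs.getD m ' ') := by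
      rw [hcast, PySem.List.pyGet?_natCast, List.getElem?_eq_getElem (by omega),
        List.getD_eq_getElem cs ' ' (by omega)]
    unfold glnLeftLoop
    rw [hget]
    simp only
    by_cases hd : PySem.Chars.isdigit (cs.getD m ' ') = true
    · have hd' : PySem.Chars.isdigit (cs[m]?.getD ' ') = true := by simpa [List.getD] using hd
      simp only [hd, if_true, hcast]
      by_cases hm : m = 0
      · subst hm; rw [bnd_succ]; simp [bnd, hd']
      · have : ¬ ((m : Int) = 0) := by exact_mod_cast hm
        simp only [this, if_false]
        rw [ih m (by omega) (by omega) (by omega), bnd_succ]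
        simp [hd']
    · have hd' : PySem.Chars.isdigit (cs[m]?.getD ' ') = false := by
        simpa [List.getD] using hd
      simp only [hd, Bool.false_eq_true, if_false]
      rw [bnd_succ]
      simp [hd']

theorem A_right (cs : List Char) (f : Nat) : ∀ (j : Nat) (acc : List Char),
    (cs.drop j).any (fun c => !PySem.Chars.isdigit c) = true → cs.length - j < f →
    glnRightLoop cs f (j : Int) acc = some (acc ++ (cs.drop j).takeWhile PySem.Chars.isdigit) := by
  induction f with
  | zero => intro j acc _ hf; omega
  | succ f ih =>
    intro j acc hany hf
    have hj : j < cs.length := by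
      by_contra h
      rw [List.drop_of_length_le (by omega)] at hany
      simp at hany
    have hdrop : cs.drop j = cs[j] :: cs.drop (j + 1) := List.drop_eq_getElem_cons hj
    have hget : PySem.List.pyGet? cs (j : Int) = some cs[j] := by
      rw [PySem.List.pyGet?_natCast, List.getElem?_eq_getElem hj]
    unfold glnRightLoop
    rw [hget]
    simp only
    by_cases hd : PySem.Chars.isdigit cs[j] = true
    · simp only [hd, if_true]
      have hcast : (j : Int) + 1 = ((j + 1 : Nat) : Int) := by push_cast; ring
      have hany' : (cs.drop (j + 1)).any (fun c => !PySem.Chars.isdigit c) = true := by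
        rcases List.any_eq_true.mp hany with ⟨x, hx, hpx⟩
        rw [hdrop, List.mem_cons] at hx
        rcases hx with rfl | hx
        · simp [hd] at hpx
        · exact List.any_eq_true.mpr ⟨x, hx, hpx⟩
      rw [hcast, ih (j + 1) (acc ++ [cs[j]]) hany' (by omega)]
      rw [hdrop, List.takeWhile_cons, hd]
      simp
    · simp only [hd, Bool.false_eq_true, if_false]
      rw [hdrop, List.takeWhile_cons]
      simp [hd]

theorem B_left (cs : List Char) (f : Nat) : ∀ (k : Nat) (acc : List Char),
    k ≤ cs.length → k ≤ f →
    altLeftLoop cs f ((k : Int) - 1) acc = (cs.take k).drop (bnd cs k) ++ acc := by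
  induction f with
  | zero =>
    intro k acc hk hf
    obtain rfl : k = 0 := by omega
    simp [altLeftLoop, bnd]
  | succ f ih =>
    intro k acc hk hf
    by_cases hk0 : k = 0
    · subst hk0
      unfold altLeftLoop
      norm_num [bnd]
    · obtain ⟨m, rfl⟩ : ∃ m, k = m + 1 := ⟨k - 1, by omega⟩
      have hm : m < cs.length := by omega
      have hcast : ((m + 1 : Nat) : Int) - 1 = (m : Int) := by push_cast; ring
      have hget : PySem.List.pyGet? cs ((m : Int)) = some cs[m] := by
        rw [PySem.List.pyGet?_natCast, List.getElem?_eq_getElem hm]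
      unfold altLeftLoop
      rw [hcast]
      simp only [Int.natCast_nonneg, if_true, hget]
      by_cases hd : PySem.Chars.isdigit cs[m] = true
      · have hd' : PySem.Chars.isdigit (cs.getD m ' ') = true := by
          rw [List.getD_eq_getElem cs ' ' hm]; exact hd
        simp only [hd, if_true]
        rw [ih m (cs[m] :: acc) (by omega) (by omega)]
        rw [bnd_succ, if_pos hd']
        rw [List.take_add_one, List.getElem?_eq_getElem hm,
          List.drop_append_of_le_length (by simp [List.length_take]; have := bnd_le cs m; omega)]
        simp
      · have hd' : ¬ PySem.Chars.isdigit (cs.getD m ' ') = true := by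
          rw [List.getD_eq_getElem cs ' ' hm]; exact hd
        simp only [hd, Bool.false_eq_true, if_false]
        rw [bnd_succ, if_neg hd']
        simp

theorem B_right (cs : List Char) (f : Nat) : ∀ (j : Nat) (acc : List Char),
    cs.length - j < f →
    altRightLoop cs f (j : Int) acc = acc ++ (cs.drop j).takeWhile PySem.Chars.isdigit := by
  induction f with
  | zero => intro j acc hf; omega
  | succ f ih =>
    intro j acc hf
    unfold altRightLoop
    by_cases hj : j < cs.length
    · have hlt : (j : Int) < (cs.length : Int) := by exact_mod_cast hj
      have hget : PySem.List.pyGet? cs (j : Int) = some cs[j] := by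
        rw [PySem.List.pyGet?_natCast, List.getElem?_eq_getElem hj]
      simp only [hlt, if_true, hget]
      have hdrop : cs.drop j = cs[j] :: cs.drop (j + 1) := List.drop_eq_getElem_cons hj
      by_cases hd : PySem.Chars.isdigit cs[j] = true
      · simp only [hd, if_true]
        have hcast : (j : Int) + 1 = ((j + 1 : Nat) : Int) := by push_cast; ring
        rw [hcast, ih (j + 1) (acc ++ [cs[j]]) (by omega)]
        rw [hdrop, List.takeWhile_cons, hd]
        simp
      · simp only [hd, Bool.false_eq_true, if_false]
        rw [hdrop, List.takeWhile_cons]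
        simp [hd]
    · have hlt : ¬ ((j : Int) < (cs.length : Int)) := by exact_mod_cast hj
      simp only [hlt, if_false]
      rw [List.drop_of_length_le (by omega)]
      simp

theorem drop_any_mono (cs : List Char) (b k : Nat) (hbk : b ≤ k)
    (h : (cs.drop k).any (fun c => !PySem.Chars.isdigit c) = true) :
    (cs.drop b).any (fun c => !PySem.Chars.isdigit c) = true := by
  rcases List.any_eq_true.mp h with ⟨x, hx, hpx⟩
  refine List.any_eq_true.mpr ⟨x, ?_, hpx⟩
  have : cs.drop k = (cs.drop b).drop (k - b) := by
    rw [List.drop_drop]; congr 1; omega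
  rw [this] at hx
  exact List.drop_subset _ _ hx

theorem gln_eq (cl : String) (s : Int) (hpre : Pre_get_left_number cl s) :
    get_left_number cl s = get_left_number_alt cl s := by
  unfold get_left_number get_left_number_alt
  rcases hpre with h0 | ⟨hneg, hguard⟩ | ⟨h1, h2, himp⟩
  · simp [h0]
  · have hs0 : ¬ (s = 0) := by omega
    simp only [hs0, if_false]
    cases hg : PySem.List.pyGet? cl.toList (s - 1) with
    | none => rfl
    | some c =>
      rw [hg] at hguard
      simp only [Option.map_some, Option.getD_some, Bool.not_eq_true'] at hguard
      simp [hguard]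
  · obtain ⟨k, rfl⟩ : ∃ k : Nat, s = (k : Int) := ⟨s.toNat, (Int.toNat_of_nonneg (by omega)).symm⟩
    have hk1 : 1 ≤ k := by exact_mod_cast h1
    have hk2 : k ≤ cl.toList.length := by exact_mod_cast h2
    have hs0 : ¬ ((k : Int) = 0) := by exact_mod_cast (by omega : ¬ k = 0)
    simp only [hs0, if_false]
    have hm : k - 1 < cl.toList.length := by omega
    have hget : PySem.List.pyGet? cl.toList ((k : Int) - 1) = some (cl.toList[k - 1]) := by
      have h : (k : Int) - 1 = ((k - 1 : Nat) : Int) := by omega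
      rw [h, PySem.List.pyGet?_natCast, List.getElem?_eq_getElem hm]
    rw [hget]
    by_cases hd : PySem.Chars.isdigit (cl.toList[k - 1]) = true
    · have hany : (cl.toList.drop k).any (fun c => !PySem.Chars.isdigit c) = true := by
        apply himp
        have e1 : ((k : Int) - 1).toNat = k - 1 := by omega
        rw [e1, List.getD_eq_getElem cl.toList ' ' hm]
        exact hd
      have hb := bnd_le cl.toList k
      have hanyb := drop_any_mono cl.toList (bnd cl.toList k) k hb hany
      have hnatAbs : ((k : Int)).natAbs = k := Int.natAbs_natCast k
      simp only [hd, not_true, if_false, hnatAbs]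
      rw [A_left cl.toList (cl.toList.length + k + 1) k hk1 hk2 (by omega)]
      dsimp only
      rw [A_right cl.toList (cl.toList.length + k + 1) (bnd cl.toList k) [] hanyb (by omega)]
      rw [B_left cl.toList (k + 1) k [] hk2 (by omega)]
      rw [B_right cl.toList (cl.toList.length + k + 1) k [] (by omega)]
      rw [takeWhile_split cl.toList k hk2]
      simp
    · simp [hd]

theorem raises_not_pre (cl : String) (s : Int) (hr : Raises_get_left_number cl s) :
    ¬ Pre_get_left_number cl s := by
  intro hpre
  rcases hr with ⟨h1, h2, hd, hall⟩ | ⟨hneg, hlen, hall⟩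
  · rcases hpre with h0 | ⟨hneg, _⟩ | ⟨_, _, himp⟩
    · omega
    · omega
    · rcases List.any_eq_true.mp (himp hd) with ⟨x, hx, hpx⟩
      have hx' := List.all_eq_true.mp hall x hx
      simp [hx'] at hpx
  · rcases hpre with h0 | ⟨_, hguard⟩ | ⟨h1, _, _⟩
    · omega
    · set cs := cl.toList with hcs
      have hk : s - 1 = -(((1 - s).toNat : Nat) : Int) := by omega
      have hk1 : 0 < (1 - s).toNat := by omega
      have hk2 : (1 - s).toNat ≤ cs.length := by omega
      have hidx : cs.length - (1 - s).toNat < cs.length := by omega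
      rw [hk, PySem.List.pyGet?_neg_natCast cs (1 - s).toNat hk1 hk2, List.getElem?_eq_getElem hidx] at hguard
      simp only [Option.map_some, Option.getD_some, Bool.not_eq_true'] at hguard
      -- the guard char lies inside the all-digit prefix
      have ht : (s + (cs.length : Int)).toNat ≤ cs.length := by omega
      have hlt : cs.length - (1 - s).toNat < (s + (cs.length : Int)).toNat := by omega
      have hlen2 : cs.length - (1 - s).toNat < (cs.take (s + (cs.length : Int)).toNat).length := by
        simp only [List.length_take]
        omega
      have hmem : cs[cs.length - (1 - s).toNat] ∈ cs.take (s + (cs.length : Int)).toNat := by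
        rw [← List.getElem_take (xs := cs) (j := (s + (cs.length : Int)).toNat) (h := hlen2)]
        exact List.getElem_mem hlen2
      have := List.all_eq_true.mp hall _ hmem
      rw [this] at hguard
      simp at hguard
    · omega

-- ===== VERDICT (by name: the statement is the Claim_ definition above) =====
theorem get_left_number_spec : Claim_equal_get_left_number := by
  intro current_line start_index _ hpre
  unfold Spec_get_left_number
  exact gln_eq current_line start_index hpre

@[simp] theorem get_left_number_raises : Claim_raises_get_left_number := by
  unfold Claim_raises_get_left_number
  exact ⟨fun cl s _ hr => raises_not_pre cl s hr, by decide⟩
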